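-- pv_equiv track=rewrite | github.com/joydas65/Codeforces-Problems | Given_Length_And_Sum_Of_Digits.py | func
-- ===== SOURCE A (Python) =====
-- def func(m,s):
--
--     ans = ""
--
--     while m >= 1:
--
--         if s >= 10:
--
--             ans += "9"
--
--             s -= 9
--
--         else:
--
--             ans += str(s)
--
--             s = 0
--
--         m -= 1
--
--     return ans
-- ===== SOURCE B (Python) =====
-- def func(m, s):
--     if m < 1:
--         return ""
--     if s < 10:
--         return str(s) + "0" * (m - 1)
--     q, r = divmod(s, 9)
--     if q >= m:
--         return "9" * m
--     if r == 0:
--         return "9" * q + "0" * (m - q)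
--     return "9" * q + str(r) + "0" * (m - q - 1)
-- ===== Notes on version B (the rewrite author's own statement) =====
-- stated objective: faster
-- what changed: Replaces the per-digit greedy while-loop (append one char per position) with a divmod-based closed form that emits the answer as three segments: a run of nines, one remainder digit, and trailing zeros.
import Mathlib
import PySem

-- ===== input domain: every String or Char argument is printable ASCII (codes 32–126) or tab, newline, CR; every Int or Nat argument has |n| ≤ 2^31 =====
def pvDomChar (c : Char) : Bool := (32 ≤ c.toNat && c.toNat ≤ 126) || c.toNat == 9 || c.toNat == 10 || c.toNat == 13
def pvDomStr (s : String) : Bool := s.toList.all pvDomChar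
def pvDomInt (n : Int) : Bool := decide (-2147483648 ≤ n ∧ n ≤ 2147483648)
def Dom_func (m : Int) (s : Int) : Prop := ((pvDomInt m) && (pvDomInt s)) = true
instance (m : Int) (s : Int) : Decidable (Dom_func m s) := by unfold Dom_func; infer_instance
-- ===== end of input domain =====

-- B replaces A's per-digit greedy while-loop with a divmod-based three-segment closed form.

-- ===== PORT A =====
-- the while loop runs exactly max(m,0) times (m -= 1 each iteration); fuel = m.toNat
def funcLoop : Nat → Int → String → String
  | 0, _, ans => ans
  | n+1, s, ans =>
      if s ≥ 10 then funcLoop n (s - 9) (ans ++ "9")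
      else funcLoop n 0 (ans ++ PySem.Int.toStr s)

def func (m : Int) (s : Int) : String := funcLoop m.toNat s ""

-- ===== PORT B =====
def func_alt (m : Int) (s : Int) : String :=
  if m < 1 then ""
  else if s < 10 then PySem.Int.toStr s ++ String.ofList (List.replicate (m - 1).toNat '0')
  else
    let q := PySem.Int.floordiv s 9
    let r := PySem.Int.mod s 9
    if q ≥ m then String.ofList (List.replicate m.toNat '9')
    else if r = 0 then String.ofList (List.replicate q.toNat '9') ++ String.ofList (List.replicate (m - q).toNat '0')
    else String.ofList (List.replicate q.toNat '9') ++ PySem.Int.toStr r ++ String.ofList (List.replicate (m - q - 1).toNat '0')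

-- ===== PRECONDITION & SPEC =====
def Spec_func (m : Int) (s : Int) (out : String) : Prop := out = func_alt m s
instance (m : Int) (s : Int) (out : String) : Decidable (Spec_func m s out) := by unfold Spec_func; infer_instance

-- ===== CLAIM (what is proved, stated in full; the proofs are below) =====
def Claim_equal_func : Prop := ∀ (m : Int) (s : Int), Dom_func m s → Spec_func m s (func m s)

-- ===== LEMMAS AND PROOFS =====

theorem funcLoop_prefix (n : Nat) : ∀ (s : Int) (a : String), funcLoop n s a = a ++ funcLoop n s "" := by
  induction n with
  | zero =>
      intro s a
      apply String.toList_inj.mp; simp [funcLoop]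
  | succ k ih =>
      intro s a
      by_cases h : s ≥ 10
      · rw [show funcLoop (k+1) s a = funcLoop k (s-9) (a ++ "9") from by simp [funcLoop, h],
           show funcLoop (k+1) s "" = funcLoop k (s-9) ("" ++ "9") from by simp [funcLoop, h],
           ih (s-9) (a ++ "9"), ih (s-9) ("" ++ "9")]
        apply String.toList_inj.mp; simp
      · rw [show funcLoop (k+1) s a = funcLoop k 0 (a ++ PySem.Int.toStr s) from by simp [funcLoop, h],
           show funcLoop (k+1) s "" = funcLoop k 0 ("" ++ PySem.Int.toStr s) from by simp [funcLoop, h],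
           ih 0 (a ++ PySem.Int.toStr s), ih 0 ("" ++ PySem.Int.toStr s)]
        apply String.toList_inj.mp; simp

theorem funcLoop_zeros (n : Nat) : ∀ (a : String), funcLoop n 0 a = a ++ String.ofList (List.replicate n '0') := by
  induction n with
  | zero =>
      intro a; apply String.toList_inj.mp; simp [funcLoop]
  | succ k ih =>
      intro a
      have h0 : PySem.Int.toStr 0 = "0" := by decide
      rw [show funcLoop (k+1) 0 a = funcLoop k 0 (a ++ "0") from by simp [funcLoop, h0], ih]
      apply String.toList_inj.mp; simp [List.replicate_succ]

theorem func_alt_step (n : Nat) (s : Int) (h : 10 ≤ s) :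
    func_alt ((n+1 : Nat) : Int) s = "9" ++ func_alt (n : Int) (s - 9) := by
  have h9 : (0:Int) < 9 := by norm_num
  have t9 : ("9" : String).toList = ['9'] := by decide
  simp only [func_alt, PySem.Int.floordiv_eq_ediv_of_pos h9, PySem.Int.mod_eq_emod_of_pos h9]
  split_ifs with h1 h2 h3 h4 h5 h6 h7 h8 h9a h10 h11 h12 h13 h14 h15
  all_goals try omega
  · -- n = 0, all nines of length 1
    have hn : n = 0 := by omega
    subst hn; decide
  · -- q >= n+1 and s-9 < 10: forces s = 18, n = 1
    have hs : s = 18 := by omega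
    have hn : n = 1 := by omega
    subst hs; subst hn; decide
  · -- q >= n+1, deep case: peel one nine
    apply String.toList_inj.mp
    have e1 : ((↑(n+1) : Int)).toNat = ((↑n : Int)).toNat + 1 := by omega
    rw [e1, List.replicate_succ]
    simp [t9]
  · -- r = 0, s - 9 < 10: s = 18
    have hs : s = 18 := by omega
    subst hs
    apply String.toList_inj.mp
    have e1 : ((18:Int)/9).toNat = 2 := by decide
    have e2 : ((↑(n+1) : Int) - 18/9).toNat = ((↑n : Int) - 1).toNat := by omega
    have e3 : PySem.Int.toStr ((18:Int) - 9) = "9" := by decide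
    rw [e1, e2, e3]
    simp [t9, List.replicate_succ]
  · -- r = 0, deep case
    apply String.toList_inj.mp
    have e1 : ((s:Int)/9).toNat = ((s-9)/9).toNat + 1 := by omega
    have e2 : ((↑(n+1) : Int) - s/9).toNat = ((↑n : Int) - (s-9)/9).toNat := by omega
    rw [e1, e2, List.replicate_succ]
    simp [t9]
  · -- r ≠ 0, s - 9 < 10: one nine then the digit s-9 = s%9
    apply String.toList_inj.mp
    have e1 : ((s:Int)/9).toNat = 1 := by omega
    have e2 : ((↑(n+1) : Int) - s/9 - 1).toNat = ((↑n : Int) - 1).toNat := by omega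
    have e3 : s % 9 = s - 9 := by omega
    rw [e1, e2, e3]
    simp [t9]
  · -- r ≠ 0, deep case
    apply String.toList_inj.mp
    have e1 : ((s:Int)/9).toNat = ((s-9)/9).toNat + 1 := by omega
    have e2 : ((↑(n+1) : Int) - s/9 - 1).toNat = ((↑n : Int) - (s-9)/9 - 1).toNat := by omega
    have e3 : s % 9 = (s - 9) % 9 := by omega
    rw [e1, e2, e3, List.replicate_succ]
    simp [t9]

theorem main_lemma (n : Nat) : ∀ (s : Int), funcLoop n s "" = func_alt (n : Int) s := by
  induction n with
  | zero =>
      intro s; simp [funcLoop, func_alt]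
  | succ k ih =>
      intro s
      by_cases h : s ≥ 10
      · rw [show funcLoop (k+1) s "" = funcLoop k (s-9) ("" ++ "9") from by simp [funcLoop, h],
           funcLoop_prefix, ih (s-9), func_alt_step k s h]
        apply String.toList_inj.mp; simp
      · rw [show funcLoop (k+1) s "" = funcLoop k 0 ("" ++ PySem.Int.toStr s) from by simp [funcLoop, h],
           funcLoop_zeros]
        have h1 : ¬ ((k+1 : Nat) : Int) < 1 := by omega
        have h2 : (((k+1 : Nat) : Int) - 1).toNat = k := by omega
        simp only [func_alt, h1, if_false, if_pos (by omega : s < 10), h2]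
        apply String.toList_inj.mp; simp

theorem alt_toNat (m : Int) (s : Int) : func_alt (m.toNat : Int) s = func_alt m s := by
  by_cases h : m < 1
  · have h0 : m.toNat = 0 := by omega
    rw [h0]
    simp [func_alt, h]
  · have : (m.toNat : Int) = m := by omega
    rw [this]

-- ===== VERDICT (by name: the statement is the Claim_ definition above) =====
theorem func_spec : Claim_equal_func := by
  intro m s _
  show func m s = func_alt m s
  rw [func, main_lemma, alt_toNat]
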